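-- pv_equiv track=rewrite | github.com/oimiragieo/atp-main | tests/mutation/mutmut_config.py | get_mutation_priority
-- ===== SOURCE A (Python) =====
-- def get_mutation_priority(file_path: str) -> int:
--     """
--     Get mutation priority for a file (higher = more important to test).
--
--     Args:
--         file_path: Path to the file
--
--     Returns:
--         Priority score (1-10)
--     """
--     # Core business logic gets highest priority
--     if "router_service" in file_path:
--         return 10
--
--     # Enterprise features get high priority
--     if any(component in file_path for component in ["metrics", "observability", "monitoring"]):
--         return 8
--
--     # Integrations get medium priority
--     if "integrations" in file_path:
--         return 6
--
--     # Utilities get lower priority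
--     if "utils" in file_path or "helpers" in file_path:
--         return 4
--
--     # Default priority
--     return 5
-- ===== SOURCE B (Python) =====
-- _SCORES = {
--     "router_service": 10,
--     "metrics": 8,
--     "observability": 8,
--     "monitoring": 8,
--     "integrations": 6,
--     "utils": 4,
--     "helpers": 4,
-- }
--
-- def get_mutation_priority(file_path: str) -> int:
--     # A keyword's score; the priority is the MAXIMUM score among all keywords
--     # that occur in the path (correct because A checks groups in strictly
--     # decreasing score order, so its first match is the maximal matched score),
--     # or 5 when no keyword occurs.
--     matched = [score for keyword, score in _SCORES.items() if keyword in file_path]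
--     return max(matched) if matched else 5
-- ===== Notes on version B (the rewrite author's own statement) =====
-- stated objective: alternative
-- what changed: Replaced A's ordered first-match if-chain by an order-independent computation: collect the scores of ALL keywords occurring in the path and return their maximum (default 5), correct because A's groups are checked in strictly decreasing score order.
import Mathlib
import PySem

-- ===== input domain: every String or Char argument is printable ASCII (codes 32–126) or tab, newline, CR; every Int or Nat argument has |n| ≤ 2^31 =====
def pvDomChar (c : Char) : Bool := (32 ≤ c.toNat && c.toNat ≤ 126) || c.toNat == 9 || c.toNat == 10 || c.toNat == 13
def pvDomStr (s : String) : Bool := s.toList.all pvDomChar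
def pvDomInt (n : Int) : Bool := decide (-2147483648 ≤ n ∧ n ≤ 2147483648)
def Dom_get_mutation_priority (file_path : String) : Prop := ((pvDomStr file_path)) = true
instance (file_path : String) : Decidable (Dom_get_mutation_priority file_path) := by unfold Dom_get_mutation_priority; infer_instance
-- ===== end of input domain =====

-- B computes the maximum score over ALL matching keywords (default 5) instead of A's ordered first-match if-chain; alternative, same behaviour.


-- ===== PORT A =====
def get_mutation_priority (file_path : String) : Int :=
  if PySem.Str.isIn "router_service" file_path then 10
  else if ["metrics", "observability", "monitoring"].any (fun component => PySem.Str.isIn component file_path) then 8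
  else if PySem.Str.isIn "integrations" file_path then 6
  else if PySem.Str.isIn "utils" file_path || PySem.Str.isIn "helpers" file_path then 4
  else 5

-- ===== PORT B =====
-- the _SCORES dict (literal, distinct keys): an association list in insertion order
def pvScores : List (String × Int) :=
  [ ("router_service", 10), ("metrics", 8), ("observability", 8), ("monitoring", 8),
    ("integrations", 6), ("utils", 4), ("helpers", 4) ]

def get_mutation_priority_alt (file_path : String) : Int :=
  let matched := pvScores.filterMap
    (fun kv => if PySem.Str.isIn kv.1 file_path then some kv.2 else none)
  match PySem.List.max? matched (fun x => x) with
  | some m => m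
  | none => 5

-- ===== PRECONDITION & SPEC =====
def Spec_get_mutation_priority (file_path : String) (out : Int) : Prop := out = get_mutation_priority_alt file_path
instance (file_path : String) (out : Int) : Decidable (Spec_get_mutation_priority file_path out) := by unfold Spec_get_mutation_priority; infer_instance

-- ===== CLAIM (what is proved, stated in full; the proofs are below) =====
def Claim_equal_get_mutation_priority : Prop := ∀ (file_path : String), Dom_get_mutation_priority file_path → Spec_get_mutation_priority file_path (get_mutation_priority file_path)

-- ===== LEMMAS AND PROOFS =====

-- ===== VERDICT (by name: the statement is the Claim_ definition above) =====
theorem get_mutation_priority_spec : Claim_equal_get_mutation_priority := by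
  intro file_path _
  unfold Spec_get_mutation_priority get_mutation_priority get_mutation_priority_alt pvScores
  cases h1 : PySem.Str.isIn "router_service" file_path <;>
  cases h2 : PySem.Str.isIn "metrics" file_path <;>
  cases h3 : PySem.Str.isIn "observability" file_path <;>
  cases h4 : PySem.Str.isIn "monitoring" file_path <;>
  cases h5 : PySem.Str.isIn "integrations" file_path <;>
  cases h6 : PySem.Str.isIn "utils" file_path <;>
  cases h7 : PySem.Str.isIn "helpers" file_path <;>
    simp only [List.filterMap_cons, List.filterMap_nil, h1, h2, h3, h4, h5, h6, h7,
      List.any_cons, List.any_nil, Bool.or_false, Bool.false_or, Bool.true_or,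
      if_true, if_false, Bool.false_eq_true] <;>
    simp [PySem.List.max?]
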